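-- pv_equiv track=rewrite | github.com/jbrunclik/aoc2025 | day4.py | part2
-- ===== SOURCE A (Python) =====
-- ACCESSIBLE_THRESHOLD = 4
--
-- DIRECTIONS = [(-1, -1), (-1, 0), (-1, 1), (0, -1), (0, 1), (1, -1), (1, 0), (1, 1)]
--
-- EMPTY = "."
--
-- ROLL = "@"
--
-- def count_adjacent_rolls(grid: list[list[str]], x: int, y: int) -> int:
--     """Count how many rolls are adjacent to the cell."""
--     rows, cols = len(grid), len(grid[0])
--     count = 0
--     for dx, dy in DIRECTIONS:
--         nx, ny = x + dx, y + dy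
--         if 0 <= ny < rows and 0 <= nx < cols and grid[ny][nx] == ROLL:
--             count += 1
--     return count
--
-- def part2(grid: list[list[str]]) -> int:
--     """Repeatedly remove accessible rolls."""
--     total_removed = 0
--     while True:
--         to_remove = []
--         for y in range(len(grid)):
--             for x in range(len(grid[y])):
--                 if (
--                     grid[y][x] == ROLL
--                     and count_adjacent_rolls(grid, x, y) < ACCESSIBLE_THRESHOLD
--                 ):
--                     to_remove.append((x, y))
--         if not to_remove:
--             break
--         for x, y in to_remove:
--             grid[y][x] = EMPTY
--         total_removed += len(to_remove)
--     return total_removed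
-- ===== SOURCE B (Python) =====
-- ACCESSIBLE_THRESHOLD = 4
--
-- DIRECTIONS = [(-1, -1), (-1, 0), (-1, 1), (0, -1), (0, 1), (1, -1), (1, 0), (1, 1)]
--
-- EMPTY = "."
--
-- ROLL = "@"
--
-- def part2(grid: list[list[str]]) -> int:
--     """Repeatedly remove accessible rolls, tracking only the set of roll coordinates."""
--     rolls = {(x, y) for y, row in enumerate(grid) for x, c in enumerate(row) if c == ROLL}
--     removed = 0
--     while True:
--         keep = {
--             p
--             for p in rolls
--             if sum((p[0] + dx, p[1] + dy) in rolls for dx, dy in DIRECTIONS)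
--             >= ACCESSIBLE_THRESHOLD
--         }
--         if len(keep) == len(rolls):
--             break
--         removed += len(rolls) - len(keep)
--         rolls = keep
--     return removed
-- ===== Notes on version B (the rewrite author's own statement) =====
-- stated objective: alternative
-- what changed: B replaces A's per-round full-grid rescans and in-place grid mutation by peeling a set of roll coordinates: each round it recomputes degrees by set membership and filters the set, so only current rolls are visited.
import Mathlib
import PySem

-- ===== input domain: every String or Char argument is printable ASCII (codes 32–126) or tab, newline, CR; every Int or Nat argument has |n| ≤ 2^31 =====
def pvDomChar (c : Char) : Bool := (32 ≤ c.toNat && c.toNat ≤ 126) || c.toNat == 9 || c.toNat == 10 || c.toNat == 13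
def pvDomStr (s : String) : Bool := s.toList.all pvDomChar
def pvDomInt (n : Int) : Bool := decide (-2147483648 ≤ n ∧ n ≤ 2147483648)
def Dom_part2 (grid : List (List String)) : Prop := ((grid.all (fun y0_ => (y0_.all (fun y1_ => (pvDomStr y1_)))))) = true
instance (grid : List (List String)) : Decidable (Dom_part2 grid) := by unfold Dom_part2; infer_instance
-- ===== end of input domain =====

-- B replaces A's per-round full-grid rescans and in-place grid mutation by filtering a set of roll
-- coordinates each round (objective: alternative). Python A empties its argument grid in place and
-- B does not mutate it; the equivalence proved here is about the return value only.

-- ===== PORT A =====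
def pvDirections : List (Int × Int) :=
  [(-1, -1), (-1, 0), (-1, 1), (0, -1), (0, 1), (1, -1), (1, 0), (1, 1)]
def pvCellAt (grid : List (List String)) (x y : Int) : Option String :=
  (PySem.List.pyGet? grid y).bind (fun r => PySem.List.pyGet? r x)
def count_adjacent_rolls (grid : List (List String)) (x y : Int) : Int :=
  let rows : Int := grid.length
  let cols : Int := ((PySem.List.pyGet? grid 0).getD []).length
  pvDirections.foldl (fun count d =>
    if 0 ≤ y + d.2 ∧ y + d.2 < rows ∧ 0 ≤ x + d.1 ∧ x + d.1 < cols ∧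
        pvCellAt grid (x + d.1) (y + d.2) = some "@"
    then count + 1 else count) 0
def pvToRemove (grid : List (List String)) : List (Int × Int) :=
  (PySem.List.pyRange 0 grid.length 1).foldl (fun acc y =>
    (PySem.List.pyRange 0 (((PySem.List.pyGet? grid y).getD []).length : Int) 1).foldl
      (fun acc2 x =>
        if pvCellAt grid x y = some "@" ∧ count_adjacent_rolls grid x y < 4
        then acc2 ++ [(x, y)] else acc2) acc) []

theorem pv_toRemove_norm (grid : List (List String)) :
    pvToRemove grid =
      (PySem.List.pyRange 0 grid.length 1).flatMap (fun y =>
        ((PySem.List.pyRange 0 (((PySem.List.pyGet? grid y).getD []).length : Int) 1).filter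
            (fun x => decide (pvCellAt grid x y = some "@" ∧ count_adjacent_rolls grid x y < 4))).map
          (fun x => (x, y))) := by
  unfold pvToRemove
  simp only [PySem.List.foldl_append_ite, PySem.List.foldl_append_eq_flatMap]
  simp

theorem pv_mem_toRemove {grid : List (List String)} {p : Int × Int}
    (h : p ∈ pvToRemove grid) :
    0 ≤ p.1 ∧ 0 ≤ p.2 ∧ p.2 < grid.length ∧ pvCellAt grid p.1 p.2 = some "@" := by
  rw [pv_toRemove_norm] at h
  simp only [List.mem_flatMap, List.mem_map, List.mem_filter, PySem.List.mem_pyRange_one,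
    decide_eq_true_eq] at h
  obtain ⟨y, ⟨hy0, hy1⟩, x, ⟨⟨hx0, hx1⟩, hc⟩, rfl⟩ := h
  exact ⟨hx0, hy0, hy1, hc.1⟩

def pvSetCell (grid : List (List String)) (p : Int × Int) : List (List String) :=
  PySem.List.pySetD grid p.2 (PySem.List.pySetD ((PySem.List.pyGet? grid p.2).getD []) p.1 ".")
def pvRemoveAll (grid : List (List String)) (ps : List (Int × Int)) : List (List String) :=
  ps.foldl pvSetCell grid
def pvRollCount (grid : List (List String)) : Nat :=
  (grid.map (fun r => r.countP (· == "@"))).sum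

theorem pv_countP_set_le (r : List String) (n : Nat) :
    ((r.set n ".").countP (· == "@")) ≤ r.countP (· == "@") := by
  induction r generalizing n with
  | nil => simp
  | cons a t ih =>
    cases n with
    | zero =>
      simp only [List.set_cons_zero, List.countP_cons]
      split <;> split <;> simp_all
    | succ m => simp [List.countP_cons]; exact ih m

theorem pv_countP_set_lt (r : List String) (n : Nat) (hn : n < r.length)
    (hv : r[n]? = some "@") :
    ((r.set n ".").countP (· == "@")) < r.countP (· == "@") := by
  induction r generalizing n with
  | nil => simp at hn
  | cons a t ih =>
    cases n with
    | zero =>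
      simp at hv; subst hv
      simp only [List.set_cons_zero, List.countP_cons]
      split <;> split <;> simp_all
    | succ m =>
      simp at hv hn
      simp [List.countP_cons]
      have := ih m hn hv
      omega

theorem pv_rollCount_set_le (g : List (List String)) (k : Nat) (r' : List String)
    (h : r'.countP (· == "@") ≤ (g[k]?.getD []).countP (· == "@")) :
    pvRollCount (g.set k r') ≤ pvRollCount g := by
  induction g generalizing k with
  | nil => simp [pvRollCount]
  | cons a t ih =>
    cases k with
    | zero => simp [pvRollCount] at h ⊢; omega
    | succ m =>
      simp [pvRollCount] at h ⊢
      have := ih m h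
      simp [pvRollCount] at this; omega

theorem pv_rollCount_set_lt (g : List (List String)) (k : Nat) (r' : List String)
    (h : r'.countP (· == "@") < (g[k]?.getD []).countP (· == "@")) (hk : k < g.length) :
    pvRollCount (g.set k r') < pvRollCount g := by
  induction g generalizing k with
  | nil => simp at hk
  | cons a t ih =>
    cases k with
    | zero => simp [pvRollCount] at h ⊢; omega
    | succ m =>
      simp [pvRollCount] at h ⊢
      have := ih m h (by simpa using hk)
      simp [pvRollCount] at this; omega

theorem pv_rollCount_setCell_le (grid : List (List String)) (p : Int × Int)
    (hx : 0 ≤ p.1) (hy : 0 ≤ p.2) :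
    pvRollCount (pvSetCell grid p) ≤ pvRollCount grid := by
  unfold pvSetCell
  rw [PySem.List.pySetD_of_nonneg _ _ hy, PySem.List.pyGet?_of_nonneg _ hy,
    PySem.List.pySetD_of_nonneg _ _ hx]
  exact pv_rollCount_set_le _ _ _ (pv_countP_set_le _ _)

theorem pv_rollCount_setCell_lt (grid : List (List String)) (p : Int × Int)
    (hx : 0 ≤ p.1) (hy : 0 ≤ p.2) (hc : pvCellAt grid p.1 p.2 = some "@") :
    pvRollCount (pvSetCell grid p) < pvRollCount grid := by
  unfold pvSetCell
  unfold pvCellAt at hc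
  rw [PySem.List.pyGet?_of_nonneg _ hy] at hc
  obtain ⟨r, hr, hcell⟩ : ∃ r, grid[p.2.toNat]? = some r ∧ PySem.List.pyGet? r p.1 = some "@" := by
    cases h : grid[p.2.toNat]? with
    | none => rw [h] at hc; simp at hc
    | some r => rw [h] at hc; exact ⟨r, rfl, hc⟩
  rw [PySem.List.pyGet?_of_nonneg _ hx] at hcell
  rw [PySem.List.pySetD_of_nonneg _ _ hy, PySem.List.pyGet?_of_nonneg _ hy,
    PySem.List.pySetD_of_nonneg _ _ hx]
  refine pv_rollCount_set_lt _ _ _ ?_ (by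
    have := List.getElem?_eq_some_iff.mp hr; exact this.1)
  rw [hr]
  simp only [Option.getD_some]
  exact pv_countP_set_lt r _ (by have := List.getElem?_eq_some_iff.mp hcell; exact this.1) hcell

theorem pv_rollCount_removeAll_le (ps : List (Int × Int)) (grid : List (List String))
    (h : ∀ p ∈ ps, 0 ≤ p.1 ∧ 0 ≤ p.2) :
    pvRollCount (pvRemoveAll grid ps) ≤ pvRollCount grid := by
  induction ps generalizing grid with
  | nil => simp [pvRemoveAll]
  | cons a t ih =>
    have h1 := h a List.mem_cons_self
    calc pvRollCount (pvRemoveAll grid (a :: t))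
        = pvRollCount (pvRemoveAll (pvSetCell grid a) t) := rfl
      _ ≤ pvRollCount (pvSetCell grid a) := ih _ (fun p hp => h p (List.mem_cons_of_mem _ hp))
      _ ≤ pvRollCount grid := pv_rollCount_setCell_le grid a h1.1 h1.2


-- A's while-loop: one recursive call per iteration; the lemmas above justify termination
-- (each iteration with a nonempty to_remove strictly lowers the number of "@" cells).
theorem pv_rollCount_decrease (grid : List (List String))
    (h : pvToRemove grid ≠ []) :
    pvRollCount (pvRemoveAll grid (pvToRemove grid)) < pvRollCount grid := by
  obtain ⟨p, t, hpt⟩ := List.exists_cons_of_ne_nil h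
  have hmem : ∀ q ∈ pvToRemove grid, 0 ≤ q.1 ∧ 0 ≤ q.2 ∧ q.2 < (grid.length : Int) ∧
      pvCellAt grid q.1 q.2 = some "@" := fun q hq => pv_mem_toRemove hq
  have hp := hmem p (hpt ▸ List.mem_cons_self)
  rw [hpt]
  calc pvRollCount (pvRemoveAll grid (p :: t))
      = pvRollCount (pvRemoveAll (pvSetCell grid p) t) := rfl
    _ ≤ pvRollCount (pvSetCell grid p) := by
        refine pv_rollCount_removeAll_le t _ (fun q hq => ?_)
        have := hmem q (hpt ▸ List.mem_cons_of_mem _ hq)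
        exact ⟨this.1, this.2.1⟩
    _ < pvRollCount grid := pv_rollCount_setCell_lt grid p hp.1 hp.2.1 hp.2.2.2

def part2Loop (grid : List (List String)) : Int :=
  let tr := pvToRemove grid
  if h : tr = [] then 0
  else (tr.length : Int) + part2Loop (pvRemoveAll grid tr)
termination_by pvRollCount grid
decreasing_by exact pv_rollCount_decrease grid h


def part2 (grid : List (List String)) : Int := part2Loop grid

-- ===== PORT B =====
-- rolls = {(x, y) for y, row in enumerate(grid) for x, c in enumerate(row) if c == ROLL}
def pvRollsOf (grid : List (List String)) : PySem.Set (Int × Int) :=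
  PySem.Set.ofList ((PySem.List.enumerate grid 0).flatMap (fun yr =>
    (PySem.List.enumerate yr.2 0).filterMap (fun xc =>
      if xc.2 = "@" then some (xc.1, yr.1) else none)))


-- sum((p[0] + dx, p[1] + dy) in rolls for dx, dy in DIRECTIONS)
def pvDeg (p : Int × Int) (rolls : List (Int × Int)) : Int :=
  (pvDirections.map (fun d =>
    if PySem.Set.contains rolls (p.1 + d.1, p.2 + d.2) then (1 : Int) else 0)).sum


-- B's while-loop over the coordinate set; its results are independent of set-iteration order
def part2AltLoop (rolls : List (Int × Int)) : Int :=
  let keep := rolls.filter (fun p => decide (4 ≤ pvDeg p rolls))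
  if keep.length = rolls.length then 0
  else ((rolls.length : Int) - (keep.length : Int)) + part2AltLoop keep
termination_by rolls.length
decreasing_by
  refine Nat.lt_of_le_of_ne ?_ (by assumption)
  simpa using List.length_filter_le _ rolls.attach


def part2_alt (grid : List (List String)) : Int := part2AltLoop (pvRollsOf grid)

-- ===== PRECONDITION & SPEC =====
-- Pre_ excludes ragged grids that contain a roll: on those A either raises IndexError or measures
-- neighbour columns against the first row's width, an accident of its implementation.
def Pre_part2 (grid : List (List String)) : Prop :=
  (∀ r ∈ grid, ∀ c ∈ r, c ≠ "@") ∨ (∀ r ∈ grid, r.length = (grid.headD []).length)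
instance (grid : List (List String)) : Decidable (Pre_part2 grid) := by
  unfold Pre_part2; infer_instance

def pvWitness_part2 : List (List String) := [["@", "@"], ["@", "@"]]

def Spec_part2 (grid : List (List String)) (out : Int) : Prop := out = part2_alt grid
instance (grid : List (List String)) (out : Int) : Decidable (Spec_part2 grid out) := by
  unfold Spec_part2; infer_instance

-- ===== CLAIM =====
def Claim_equal_part2 : Prop :=
  ∀ (grid : List (List String)), Dom_part2 grid → Pre_part2 grid → Spec_part2 grid (part2 grid)

-- ===== LEMMAS AND PROOFS =====
-- canonical row-major list of roll coordinates
def pvN (g : List (List String)) : List (Int × Int) :=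
  (PySem.List.pyRange 0 g.length 1).flatMap (fun y =>
    ((PySem.List.pyRange 0 (((PySem.List.pyGet? g y).getD []).length : Int) 1).filter
        (fun x => decide (pvCellAt g x y = some "@"))).map (fun x => (x, y)))

theorem pv_mem_N {g : List (List String)} {p : Int × Int} :
    p ∈ pvN g ↔ 0 ≤ p.2 ∧ p.2 < g.length ∧ 0 ≤ p.1 ∧
      p.1 < (((PySem.List.pyGet? g p.2).getD []).length : Int) ∧
      pvCellAt g p.1 p.2 = some "@" := by
  unfold pvN
  simp only [List.mem_flatMap, List.mem_map, List.mem_filter, PySem.List.mem_pyRange_one,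
    decide_eq_true_eq]
  constructor
  · rintro ⟨y, ⟨hy0, hy1⟩, x, ⟨⟨hx0, hx1⟩, hc⟩, rfl⟩
    exact ⟨hy0, hy1, hx0, hx1, hc⟩
  · rintro ⟨hy0, hy1, hx0, hx1, hc⟩
    exact ⟨p.2, ⟨hy0, hy1⟩, p.1, ⟨⟨hx0, hx1⟩, hc⟩, rfl⟩

theorem pv_nodup_N (g : List (List String)) : (pvN g).Nodup := by
  unfold pvN
  rw [List.nodup_flatMap]
  constructor
  · intro y _
    refine List.Nodup.map ?_ (List.Nodup.filter _ (PySem.List.nodup_pyRange_one _ _))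
    intro a b hab; simpa using hab
  · refine List.Pairwise.imp ?_ (PySem.List.pairwise_lt_pyRange_one _ _)
    intro a b hab q hqa hqb
    simp only [List.mem_map, List.mem_filter] at hqa hqb
    obtain ⟨xa, _, rfl⟩ := hqa
    obtain ⟨xb, _, h⟩ := hqb
    have := congrArg Prod.snd h
    simp at this
    omega

theorem pv_toRemove_eq (g : List (List String)) :
    pvToRemove g = (pvN g).filter (fun p => decide (count_adjacent_rolls g p.1 p.2 < 4)) := by
  rw [pv_toRemove_norm]
  unfold pvN
  rw [List.filter_flatMap]
  refine List.flatMap_congr (fun y hy => ?_)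
  rw [List.filter_map, List.filter_filter]
  congr 1
  refine List.filter_congr (fun x hx => ?_)
  simp [Function.comp, Bool.and_comm]

theorem pv_filterMap_if (l : List Int) (p : Int → Prop) [DecidablePred p] (f : Int → Int × Int) :
    (l.filterMap (fun x => if p x then some (f x) else none)) =
      (l.filter (fun x => decide (p x))).map f := by
  induction l with
  | nil => rfl
  | cons a t ih => by_cases h : p a <;> simp [h, ih]

theorem pv_rollsOf_eq (g : List (List String)) : pvRollsOf g = pvN g := by
  have key : ((PySem.List.enumerate g 0).flatMap (fun yr =>
      (PySem.List.enumerate yr.2 0).filterMap (fun xc =>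
        if xc.2 = "@" then some (xc.1, yr.1) else none))) = pvN g := by
    rw [PySem.List.enumerate_eq_map_pyRange g [], List.flatMap_map]
    unfold pvN
    have hlen : PySem.List.len g = (g.length : Int) := by simp [PySem.List.len]
    rw [hlen]
    refine List.flatMap_congr (fun y hy => ?_)
    rw [PySem.List.mem_pyRange_one] at hy
    have hrow : PySem.List.pyGetD g y [] = (PySem.List.pyGet? g y).getD [] := by
      simp [PySem.List.pyGetD, PySem.List.pyGet?]
    simp only [hrow]
    set row := (PySem.List.pyGet? g y).getD [] with hrowdef
    rw [PySem.List.enumerate_eq_map_pyRange row "", List.filterMap_map]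
    have hlen2 : PySem.List.len row = (row.length : Int) := by simp [PySem.List.len]
    rw [hlen2]
    have hcell : ∀ x ∈ PySem.List.pyRange 0 (row.length : Int) 1,
        (PySem.List.pyGetD row x "" = "@") ↔ (pvCellAt g x y = some "@") := by
      intro x hx
      rw [PySem.List.mem_pyRange_one] at hx
      have hxl : x < (row.length : Int) := hx.2
      have h1 : PySem.List.pyGetD row x "" = row[x.toNat] :=
        PySem.List.pyGetD_eq_getElem _ _ hx.1 hxl
      have hy2 : y.toNat < g.length := by
        by_contra hcon
        have : PySem.List.pyGet? g y = none := by
          rw [PySem.List.pyGet?_of_nonneg _ hy.1]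
          exact List.getElem?_eq_none (by omega)
        rw [hrowdef, this] at hxl
        simp at hxl
        omega
      have hsome : PySem.List.pyGet? g y = some g[y.toNat] := by
        rw [PySem.List.pyGet?_of_nonneg _ hy.1]
        exact List.getElem?_eq_some_iff.mpr ⟨hy2, rfl⟩
      have h2 : pvCellAt g x y = row[x.toNat]? := by
        unfold pvCellAt
        rw [hsome, hrowdef, hsome]
        simp only [Option.bind_some, Option.getD_some]
        exact PySem.List.pyGet?_of_nonneg _ hx.1
      have h3 : row[x.toNat]? = some row[x.toNat] := by
        refine List.getElem?_eq_some_iff.mpr ⟨?_, rfl⟩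
        omega
      rw [h1, h2, h3]
      simp
    calc (PySem.List.pyRange 0 (row.length : Int) 1).filterMap
          ((fun xc => if xc.2 = "@" then some (xc.1, y) else none) ∘
            fun j => (j, PySem.List.pyGetD row j ""))
        = (PySem.List.pyRange 0 (row.length : Int) 1).filterMap
            (fun x => if pvCellAt g x y = some "@" then some (x, y) else none) := by
          refine List.filterMap_congr (fun x hx => ?_)
          have := hcell x hx
          simp only [Function.comp]
          by_cases h : pvCellAt g x y = some "@"
          · simp [h, this.mpr h]
          · simp only [h, if_false]
            rw [if_neg (fun hh => h (this.mp hh))]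
      _ = ((PySem.List.pyRange 0 (row.length : Int) 1).filter
            (fun x => decide (pvCellAt g x y = some "@"))).map (fun x => (x, y)) :=
          pv_filterMap_if _ _ _
  unfold pvRollsOf
  rw [key]
  exact PySem.Set.ofList_eq_self_of_nodup _ (pv_nodup_N g)

def pvRect (g : List (List String)) : Prop := ∀ r ∈ g, r.length = (g.headD []).length

theorem pv_rowlen_eq {g : List (List String)} (hrect : pvRect g) {y : Int}
    (hy0 : 0 ≤ y) (hy1 : y < (g.length : Int)) :
    (((PySem.List.pyGet? g y).getD []).length : Int) = (((PySem.List.pyGet? g 0).getD []).length : Int) := by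
  have hne : g ≠ [] := by intro h; subst h; simp at hy1; omega
  have h0 : PySem.List.pyGet? g 0 = some (g.headD []) := by
    rw [PySem.List.pyGet?_of_nonneg _ (by omega : (0:Int) ≤ 0)]
    cases g with
    | nil => simp_all
    | cons a t => simp
  have hy : ∃ r, PySem.List.pyGet? g y = some r ∧ r ∈ g := by
    rw [PySem.List.pyGet?_of_nonneg _ hy0]
    have hlt : y.toNat < g.length := by omega
    exact ⟨g[y.toNat], List.getElem?_eq_some_iff.mpr ⟨hlt, rfl⟩, List.getElem_mem _⟩
  obtain ⟨r, hr, hrm⟩ := hy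
  rw [hr, h0]
  simp [hrect r hrm]

theorem pv_deg_eq {g : List (List String)} (hrect : pvRect g) (x y : Int) :
    count_adjacent_rolls g x y = pvDeg (x, y) (pvN g) := by
  unfold count_adjacent_rolls pvDeg
  rw [PySem.List.foldl_ite_add_one, PySem.List.sum_map_ite_one_zero]
  simp only [Int.zero_add]
  congr 1
  refine List.countP_congr (fun d _ => ?_)
  simp only [decide_eq_true_eq, PySem.Set.contains_iff]
  rw [pv_mem_N]
  constructor
  · rintro ⟨h1, h2, h3, h4, h5⟩
    refine ⟨h1, h2, h3, ?_, h5⟩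
    rwa [pv_rowlen_eq hrect h1 h2]
  · rintro ⟨h1, h2, h3, h4, h5⟩
    refine ⟨h1, h2, h3, ?_, h5⟩
    rwa [pv_rowlen_eq hrect h1 h2] at h4

theorem pv_shape_setCell (g : List (List String)) (p : Int × Int)
    (hx : 0 ≤ p.1) (hy : 0 ≤ p.2) :
    (pvSetCell g p).length = g.length ∧
      ∀ k : Nat, ((pvSetCell g p)[k]?.getD []).length = (g[k]?.getD []).length := by
  unfold pvSetCell
  rw [PySem.List.pySetD_of_nonneg _ _ hy, PySem.List.pyGet?_of_nonneg _ hy,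
    PySem.List.pySetD_of_nonneg _ _ hx]
  refine ⟨by simp, fun k => ?_⟩
  by_cases hk : k = p.2.toNat
  · by_cases hkl : p.2.toNat < g.length
    · rw [hk, List.getElem?_set_self hkl]
      simp
    · rw [List.set_eq_of_length_le (by omega)]
  · rw [List.getElem?_set_ne (fun h => hk h.symm)]

theorem pv_cell_setCell (g : List (List String)) (r q : Int × Int)
    (hrx : 0 ≤ r.1) (hry : 0 ≤ r.2) (hqx : 0 ≤ q.1) (hqy : 0 ≤ q.2)
    (hin : r.2 < (g.length : Int) ∧ r.1 < ((g[r.2.toNat]?.getD []).length : Int)) :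
    pvCellAt (pvSetCell g r) q.1 q.2 = if q = r then some "." else pvCellAt g q.1 q.2 := by
  unfold pvSetCell pvCellAt
  rw [PySem.List.pySetD_of_nonneg _ _ hry, PySem.List.pyGet?_of_nonneg _ hry,
    PySem.List.pySetD_of_nonneg _ _ hrx,
    PySem.List.pyGet?_of_nonneg _ hqy, PySem.List.pyGet?_of_nonneg _ hqy]
  have hr2 : r.2.toNat < g.length := by omega
  by_cases hyy : q.2.toNat = r.2.toNat
  · rw [hyy, List.getElem?_set_self hr2]
    have hrow : g[r.2.toNat]? = some g[r.2.toNat] := List.getElem?_eq_some_iff.mpr ⟨hr2, rfl⟩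
    rw [hrow]
    simp only [Option.getD_some, Option.bind_some]
    rw [PySem.List.pyGet?_of_nonneg _ hqx, PySem.List.pyGet?_of_nonneg _ hqx]
    by_cases hxx : q.1.toNat = r.1.toNat
    · rw [hxx]
      have hr1 : r.1.toNat < (g[r.2.toNat]).length := by
        rw [hrow] at hin
        simp only [Option.getD_some] at hin
        omega
      rw [List.getElem?_set_self hr1, if_pos (Prod.ext (by omega) (by omega))]
    · rw [List.getElem?_set_ne (fun h => hxx h.symm), if_neg ?_]
      intro h; subst h; exact hxx rfl
  · rw [List.getElem?_set_ne (fun h => hyy h.symm), if_neg ?_]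
    intro h; subst h; exact hyy rfl

def pvOkList (g : List (List String)) (R : List (Int × Int)) : Prop :=
  ∀ p ∈ R, 0 ≤ p.1 ∧ 0 ≤ p.2 ∧ p.2 < (g.length : Int) ∧
    p.1 < ((g[p.2.toNat]?.getD []).length : Int)

theorem pv_shape_removeAll (R : List (Int × Int)) (g : List (List String))
    (h : ∀ p ∈ R, 0 ≤ p.1 ∧ 0 ≤ p.2) :
    (pvRemoveAll g R).length = g.length ∧
      ∀ k : Nat, ((pvRemoveAll g R)[k]?.getD []).length = (g[k]?.getD []).length := by
  induction R generalizing g with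
  | nil => exact ⟨rfl, fun _ => rfl⟩
  | cons a t ih =>
    have ha := h a List.mem_cons_self
    have h1 := pv_shape_setCell g a ha.1 ha.2
    have h2 := ih (pvSetCell g a) (fun p hp => h p (List.mem_cons_of_mem _ hp))
    exact ⟨h2.1.trans h1.1, fun k => (h2.2 k).trans (h1.2 k)⟩

theorem pv_cell_removeAll (R : List (Int × Int)) (g : List (List String))
    (hok : pvOkList g R) (q : Int × Int) (hqx : 0 ≤ q.1) (hqy : 0 ≤ q.2) :
    pvCellAt (pvRemoveAll g R) q.1 q.2 =
      if q ∈ R then some "." else pvCellAt g q.1 q.2 := by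
  induction R generalizing g with
  | nil => simp [pvRemoveAll]
  | cons a t ih =>
    have ha := hok a List.mem_cons_self
    have hshape := pv_shape_setCell g a ha.1 ha.2.1
    have hok' : pvOkList (pvSetCell g a) t := by
      intro p hp
      have := hok p (List.mem_cons_of_mem _ hp)
      refine ⟨this.1, this.2.1, ?_, ?_⟩
      · rw [hshape.1]; exact this.2.2.1
      · rw [hshape.2 p.2.toNat]; exact this.2.2.2
    have step : pvRemoveAll g (a :: t) = pvRemoveAll (pvSetCell g a) t := rfl
    rw [step, ih (pvSetCell g a) hok']
    have hcell := pv_cell_setCell g a q ha.1 ha.2.1 hqx hqy ⟨ha.2.2.1, ha.2.2.2⟩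
    by_cases hqt : q ∈ t
    · simp [hqt]
    · rw [if_neg hqt, hcell]
      by_cases hqa : q = a
      · simp [hqa]
      · rw [if_neg hqa, if_neg (by simp [hqa, hqt])]

theorem pv_N_removeAll (g : List (List String)) (c : Int × Int → Bool) :
    pvN (pvRemoveAll g ((pvN g).filter c)) = (pvN g).filter (fun p => !c p) := by
  set R := (pvN g).filter c with hR
  have hRsub : ∀ p ∈ R, p ∈ pvN g := fun p hp => (List.mem_filter.mp hp).1
  have hok : pvOkList g R := by
    intro p hp
    have hm := pv_mem_N.mp (hRsub p hp)
    refine ⟨hm.2.2.1, hm.1, hm.2.1, ?_⟩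
    have h4 := hm.2.2.2.1
    rwa [PySem.List.pyGet?_of_nonneg _ hm.1] at h4
  have hnn : ∀ p ∈ R, 0 ≤ p.1 ∧ 0 ≤ p.2 := fun p hp => ⟨(hok p hp).1, (hok p hp).2.1⟩
  have hshape := pv_shape_removeAll R g hnn
  set g' := pvRemoveAll g R with hg'
  have hmemR : ∀ p : Int × Int, p ∈ pvN g → (p ∈ R ↔ c p = true) := by
    intro p hp
    rw [hR, List.mem_filter]
    exact ⟨fun h => h.2, fun h => ⟨hp, h⟩⟩
  -- unfold both sides to flatMaps over the same ranges
  conv_lhs => rw [pvN, hshape.1]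
  conv_rhs => rw [pvN]
  rw [List.filter_flatMap]
  refine List.flatMap_congr (fun y hy => ?_)
  rw [PySem.List.mem_pyRange_one] at hy
  have hrowlen : (((PySem.List.pyGet? g' y).getD []).length : Int) =
      (((PySem.List.pyGet? g y).getD []).length : Int) := by
    rw [PySem.List.pyGet?_of_nonneg _ hy.1, PySem.List.pyGet?_of_nonneg _ hy.1]
    exact_mod_cast hshape.2 y.toNat
  rw [hrowlen]
  rw [List.filter_map, List.filter_filter]
  congr 1
  refine List.filter_congr (fun x hx => ?_)
  rw [PySem.List.mem_pyRange_one] at hx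
  have hcell := pv_cell_removeAll R g hok (x, y) hx.1 hy.1
  rw [← hg'] at hcell
  simp only [Function.comp]
  by_cases hc : pvCellAt g x y = some "@"
  · have hmem : (x, y) ∈ pvN g := by
      rw [pv_mem_N]
      exact ⟨hy.1, hy.2, hx.1, hx.2, hc⟩
    by_cases hr : (x, y) ∈ R
    · rw [hcell, if_pos hr]
      have : c (x, y) = true := (hmemR _ hmem).mp hr
      simp [this]
    · rw [hcell, if_neg hr]
      have : c (x, y) = false := by
        cases h : c (x, y)
        · rfl
        · exact absurd ((hmemR _ hmem).mpr h) hr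
      simp [this, hc]
  · have hr : (x, y) ∉ R := fun h => hc (pv_mem_N.mp (hRsub _ h)).2.2.2.2
    rw [hcell, if_neg hr]
    simp [hc]

theorem pv_rect_removeAll (g : List (List String)) (R : List (Int × Int))
    (hnn : ∀ p ∈ R, 0 ≤ p.1 ∧ 0 ≤ p.2) (hrect : pvRect g) :
    pvRect (pvRemoveAll g R) := by
  have hshape := pv_shape_removeAll R g hnn
  intro r hr
  obtain ⟨k, hk, rfl⟩ := List.mem_iff_getElem.mp hr
  have hk' : k < g.length := by rw [← hshape.1]; exact hk
  have e1 : (pvRemoveAll g R)[k] = (pvRemoveAll g R)[k]?.getD [] := by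
    rw [List.getElem?_eq_some_iff.mpr ⟨hk, rfl⟩]; rfl
  have e2 : ((pvRemoveAll g R).headD []) = ((pvRemoveAll g R)[0]?.getD []) := by
    rw [List.headD_eq_head?, List.head?_eq_getElem?]
  rw [e1, e2, hshape.2 k, hshape.2 0]
  have hg : g[k] ∈ g := List.getElem_mem _
  have := hrect _ hg
  rw [List.getElem?_eq_some_iff.mpr ⟨hk', rfl⟩]
  have e3 : (g.headD []) = (g[0]?.getD []) := by
    rw [List.headD_eq_head?, List.head?_eq_getElem?]
  rw [← e3]
  exact this


theorem pv_main : ∀ (n : Nat) (g : List (List String)), pvRollCount g = n → pvRect g →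
    part2Loop g = part2AltLoop (pvN g) := by
  intro n
  induction n using Nat.strong_induction_on with
  | _ n ih =>
    intro g hn hrect
    set cB := fun p : Int × Int => decide (count_adjacent_rolls g p.1 p.2 < 4) with hcB
    have hkeep : (pvN g).filter (fun p => decide (4 ≤ pvDeg p (pvN g))) =
        (pvN g).filter (fun p => !cB p) := by
      refine List.filter_congr (fun p _ => ?_)
      rw [← pv_deg_eq hrect p.1 p.2, hcB]
      rw [← decide_not]
      congr 1
      · simp [not_lt]
    rw [part2Loop, part2AltLoop]
    simp only [hkeep]
    rw [pv_toRemove_eq]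
    rw [show (fun p : Int × Int => decide (count_adjacent_rolls g p.1 p.2 < 4)) = cB from rfl]
    by_cases hemp : (pvN g).filter cB = []
    · rw [dif_pos hemp, if_pos]
      have : (pvN g).filter (fun p => !cB p) = pvN g := by
        apply List.filter_eq_self.mpr
        intro a ha
        have := List.filter_eq_nil_iff.mp hemp a ha
        simp only [Bool.not_eq_true'] at this ⊢
        simp [this]
      rw [this]
    · rw [dif_neg hemp]
      have hlensum := List.length_eq_length_filter_add (l := pvN g) cB
      have hpos : 0 < ((pvN g).filter cB).length := List.length_pos_iff.mpr hemp
      rw [if_neg (by omega)]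
      have harith : ((((pvN g).filter cB).length : Nat) : Int) =
          ((pvN g).length : Int) - (((pvN g).filter (fun p => !cB p)).length : Int) := by
        omega
      rw [harith]
      congr 1
      -- recursive call
      have htr : pvToRemove g = (pvN g).filter cB := pv_toRemove_eq g
      have hnn : ∀ p ∈ (pvN g).filter cB, 0 ≤ p.1 ∧ 0 ≤ p.2 := by
        intro p hp
        have := pv_mem_N.mp (List.mem_filter.mp hp).1
        exact ⟨this.2.2.1, this.1⟩
      have hdec : pvRollCount (pvRemoveAll g ((pvN g).filter cB)) < n := by
        rw [← hn, ← htr]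
        apply pv_rollCount_decrease
        rw [htr]; exact hemp
      have hrect' := pv_rect_removeAll g _ hnn hrect
      rw [ih _ hdec _ rfl hrect', pv_N_removeAll g cB]

theorem pv_N_nil_of_noroll {g : List (List String)} (h : ∀ r ∈ g, ∀ c ∈ r, c ≠ "@") :
    pvN g = [] := by
  rw [List.eq_nil_iff_forall_not_mem]
  intro p hp
  have hm := (pv_mem_N.mp hp).2.2.2.2
  unfold pvCellAt at hm
  cases hrow : PySem.List.pyGet? g p.2 with
  | none => rw [hrow] at hm; simp at hm
  | some r =>
    rw [hrow] at hm
    simp only [Option.bind_some] at hm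
    have hrg : r ∈ g := PySem.List.mem_of_pyGet?_eq_some _ hrow
    have hcg : "@" ∈ r := PySem.List.mem_of_pyGet?_eq_some _ hm
    exact h r hrg "@" hcg rfl

theorem pv_final (g : List (List String))
    (hpre : (∀ r ∈ g, ∀ c ∈ r, c ≠ "@") ∨ pvRect g) :
    part2Loop g = part2AltLoop (pvRollsOf g) := by
  rw [pv_rollsOf_eq]
  rcases hpre with hnr | hrect
  · have hN := pv_N_nil_of_noroll hnr
    rw [part2Loop, part2AltLoop, hN]
    rw [pv_toRemove_eq, hN]
    simp
  · exact pv_main _ g rfl hrect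

theorem pv_spec_aux (grid : List (List String)) (hpre : Pre_part2 grid) :
    part2 grid = part2_alt grid := by
  unfold part2 part2_alt
  refine pv_final grid ?_
  rcases hpre with h | h
  · exact Or.inl h
  · exact Or.inr h

-- ===== VERDICT =====
theorem part2_spec : Claim_equal_part2 := by
  intro grid _ hpre
  exact pv_spec_aux grid hpre
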